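-- pv_equiv track=rewrite | github.com/azaz-azaz/jarvis | jarvis.py | convert_to_python_syntax
-- ===== SOURCE A (Python) =====
-- def convert_to_python_syntax(raw_text: str) -> str:
--     for pack in (
--         (' true', ' True'),
--         (' false', ' False'),
--         (' null', ' None'),
--         ('|\n', '\n'),
--     ):
--         raw_text = raw_text.replace(*pack)
--     return raw_text
-- ===== SOURCE B (Python) =====
-- def convert_to_python_syntax(raw_text: str) -> str:
--     table = ((' true', ' True'), (' false', ' False'), (' null', ' None'), ('|\n', '\n'))
--     out = []
--     i = 0
--     n = len(raw_text)
--     while i < n: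
--         for old, new in table:
--             if raw_text.startswith(old, i):
--                 out.append(new)
--                 i += len(old)
--                 break
--         else:
--             out.append(raw_text[i])
--             i += 1
--     return ''.join(out)
-- ===== Notes on version B (the rewrite author's own statement) =====
-- stated objective: alternative
-- what changed: Replaces four sequential full-string .replace passes with a single left-to-right scan that at each position tries the four literal patterns from a table and emits the replacement or the character.
import Mathlib
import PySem

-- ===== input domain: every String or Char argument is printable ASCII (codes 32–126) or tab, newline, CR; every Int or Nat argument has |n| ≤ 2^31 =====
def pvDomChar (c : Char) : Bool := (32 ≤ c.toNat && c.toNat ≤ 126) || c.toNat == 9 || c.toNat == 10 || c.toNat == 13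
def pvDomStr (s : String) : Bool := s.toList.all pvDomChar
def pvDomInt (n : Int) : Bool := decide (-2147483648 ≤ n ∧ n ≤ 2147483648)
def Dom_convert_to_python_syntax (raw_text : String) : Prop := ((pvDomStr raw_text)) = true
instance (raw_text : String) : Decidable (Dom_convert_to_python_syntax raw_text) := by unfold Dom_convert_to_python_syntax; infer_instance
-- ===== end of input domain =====

-- B replaces A's four sequential full-string .replace passes with a single left-to-right
-- table-driven scan (alternative algorithm, same result; not claimed faster).


-- ===== PORT A =====
-- A: for pack in ((' true',' True'),(' false',' False'),(' null',' None'),('|\n','\n')): raw_text = raw_text.replace(*pack)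
def convert_to_python_syntax (raw_text : String) : String :=
  [(" true", " True"), (" false", " False"), (" null", " None"), ("|\n", "\n")].foldl
    (fun acc pack => PySem.Str.replace acc pack.1 pack.2) raw_text

-- ===== PORT B =====
-- B: one left-to-right scan; at each position try the four table entries (str.startswith),
-- emit the replacement and skip, else emit the character.
def onePassL : List Char → List Char
  | [] => []
  | c :: t =>
    if (" true".toList).isPrefixOf (c :: t) then " True".toList ++ onePassL (t.drop 4)
    else if (" false".toList).isPrefixOf (c :: t) then " False".toList ++ onePassL (t.drop 5)
    else if (" null".toList).isPrefixOf (c :: t) then " None".toList ++ onePassL (t.drop 4)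
    else if ("|\n".toList).isPrefixOf (c :: t) then "\n".toList ++ onePassL (t.drop 1)
    else c :: onePassL t
termination_by s => s.length
decreasing_by all_goals (simp; try omega)

def convert_to_python_syntax_alt (raw_text : String) : String :=
  String.ofList (onePassL raw_text.toList)

-- ===== PRECONDITION & SPEC =====
def Spec_convert_to_python_syntax (raw_text : String) (out : String) : Prop := out = convert_to_python_syntax_alt raw_text
instance (raw_text : String) (out : String) : Decidable (Spec_convert_to_python_syntax raw_text out) := by unfold Spec_convert_to_python_syntax; infer_instance

-- ===== CLAIM (what is proved, stated in full; the proofs are below) =====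
def Claim_equal_convert_to_python_syntax : Prop := ∀ (raw_text : String), Dom_convert_to_python_syntax raw_text → Spec_convert_to_python_syntax raw_text (convert_to_python_syntax raw_text)

-- ===== LEMMAS AND PROOFS =====

-- rep p r s : one .replace pass, structural model of PySem.Chars.replace for p ≠ []
def rep (p r : List Char) : List Char → List Char
  | [] => []
  | c :: t =>
    if p.isPrefixOf (c :: t) && !p.isEmpty then r ++ rep p r ((c :: t).drop p.length)
    else c :: rep p r t
termination_by s => s.length
decreasing_by
  · rename_i h; simp at h
    have : p.length ≥ 1 := by cases p <;> simp_all
    simp; omega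
  · simp

theorem go_eq_rep (p r : List Char) (hp : p ≠ []) :
    ∀ (fuel : Nat) (l acc : List Char), l.length ≤ fuel →
      PySem.Chars.replace.go p r fuel l acc = acc.reverse ++ rep p r l := by
  intro fuel
  induction fuel with
  | zero =>
    intro l acc h
    have hl : l = [] := by cases l <;> simp_all
    subst hl
    simp [PySem.Chars.replace.go, rep]
  | succ fuel ih =>
    intro l acc h
    cases l with
    | nil => simp [PySem.Chars.replace.go, rep]
    | cons c t =>
      rw [PySem.Chars.replace.go]
      by_cases hpre : p.isPrefixOf (c :: t)
      · have hlen : ((c :: t).drop p.length).length ≤ fuel := by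
          have : p.length ≥ 1 := by cases p <;> simp_all
          simp at h ⊢
          omega
        rw [if_pos hpre, ih _ _ hlen, rep]
        rw [if_pos (by simp [hpre, hp])]
        simp
      · have hlen : t.length ≤ fuel := by simp at h; omega
        rw [if_neg hpre, ih _ _ hlen, rep]
        rw [if_neg (by simp [hpre])]
        simp

theorem replace_eq_rep (s p r : List Char) (hp : p ≠ []) :
    PySem.Chars.replace s p r = rep p r s := by
  rw [PySem.Chars.replace, if_neg (by simp [List.isEmpty_iff, hp])]
  simpa using go_eq_rep p r hp s.length s [] le_rfl

-- w is prefix of a rep-pass output iff it is a prefix of the input, when pattern and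
-- replacement both start with ' ' and w contains no ' '
theorem rep_prefix_iff (p' r' : List Char) (w : List Char) (hw : ' ' ∉ w) :
    ∀ t : List Char, (w <+: rep (' ' :: p') (' ' :: r') t ↔ w <+: t) := by
  intro t
  induction t generalizing w with
  | nil => simp [rep]
  | cons c t ih =>
    rw [rep]
    by_cases hpre : (' ' :: p').isPrefixOf (c :: t)
    · rw [if_pos (by simp [hpre])]
      have hc : c = ' ' := by
        have := (List.isPrefixOf_iff_prefix.mp hpre)
        rcases this with ⟨u, hu⟩
        simpa using congrArg (·.head?) hu.symm
      cases w with
      | nil => simp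
      | cons a w' =>
        have ha : a ≠ ' ' := by intro h; exact hw (h ▸ List.mem_cons_self)
        subst hc
        constructor <;> (intro h; exact absurd (List.cons_prefix_cons.mp h).1 ha)
    · rw [if_neg (by simp [hpre])]
      cases w with
      | nil => simp
      | cons a w' =>
        simp only [List.cons_prefix_cons]
        exact and_congr_right fun _ => ih w' (fun h => hw (List.mem_cons_of_mem _ h))

theorem main_lemma (cs : List Char) :
    rep "|\n".toList "\n".toList (rep " null".toList " None".toList
      (rep " false".toList " False".toList (rep " true".toList " True".toList cs)))
    = onePassL cs := by
  induction cs using onePassL.induct with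
  | case1 => simp [rep, onePassL]
  | case2 c t h ih =>
    obtain ⟨u, hu⟩ := List.isPrefixOf_iff_prefix.mp h
    have ht : t.drop 4 = u := by
      have h2 := hu.symm
      simp at h2
      simp [h2.2]
    rw [ht] at ih
    rw [onePassL, if_pos h, ht, ← ih, ← hu]
    simp [rep, List.isPrefixOf]
  | case3 c t h1 h ih =>
    obtain ⟨u, hu⟩ := List.isPrefixOf_iff_prefix.mp h
    have ht : t.drop 5 = u := by
      have h2 := hu.symm
      simp at h2
      simp [h2.2]
    rw [ht] at ih
    rw [onePassL, if_neg h1, if_pos h, ht, ← ih, ← hu]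
    simp [rep, List.isPrefixOf]
  | case4 c t h1 h2 h ih =>
    obtain ⟨u, hu⟩ := List.isPrefixOf_iff_prefix.mp h
    have ht : t.drop 4 = u := by
      have h2 := hu.symm
      simp at h2
      simp [h2.2]
    rw [ht] at ih
    rw [onePassL, if_neg h1, if_neg h2, if_pos h, ht, ← ih, ← hu]
    simp [rep, List.isPrefixOf]
  | case5 c t h1 h2 h3 h ih =>
    obtain ⟨u, hu⟩ := List.isPrefixOf_iff_prefix.mp h
    have ht : t.drop 1 = u := by
      have h2 := hu.symm
      simp at h2
      simp [h2.2]
    rw [ht] at ih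
    rw [onePassL, if_neg h1, if_neg h2, if_neg h3, if_pos h, ht, ← ih, ← hu]
    simp [rep, List.isPrefixOf]
  | case6 c t h1 h2 h3 h4 ih =>
    rw [onePassL, if_neg h1, if_neg h2, if_neg h3, if_neg h4, ← ih]
    have n1 : ¬ (([' ','t','r','u','e'] : List Char).isPrefixOf (c :: t) = true) := by
      simpa using h1
    have n2 : ¬ (([' ','f','a','l','s','e'] : List Char).isPrefixOf (c :: t) = true) := by
      simpa using h2
    have n3 : ¬ (([' ','n','u','l','l'] : List Char).isPrefixOf (c :: t) = true) := by
      simpa using h3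
    have n4 : ¬ ((['|','\n'] : List Char).isPrefixOf (c :: t) = true) := by
      simpa using h4
    have e1 : rep [' ','t','r','u','e'] [' ','T','r','u','e'] (c :: t)
        = c :: rep [' ','t','r','u','e'] [' ','T','r','u','e'] t := by
      rw [rep, if_neg (by simp [n1])]
    have m2 : ¬ (([' ','f','a','l','s','e'] : List Char).isPrefixOf
        (c :: rep [' ','t','r','u','e'] [' ','T','r','u','e'] t) = true) := by
      rw [List.isPrefixOf_iff_prefix, List.cons_prefix_cons]
      rintro ⟨hc, hpf⟩
      have hpt := (rep_prefix_iff ['t','r','u','e'] ['T','r','u','e'] ['f','a','l','s','e']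
        (by decide) t).mp hpf
      exact n2 (by rw [List.isPrefixOf_iff_prefix, List.cons_prefix_cons]; exact ⟨hc, hpt⟩)
    have e2 : rep [' ','f','a','l','s','e'] [' ','F','a','l','s','e']
        (c :: rep [' ','t','r','u','e'] [' ','T','r','u','e'] t)
        = c :: rep [' ','f','a','l','s','e'] [' ','F','a','l','s','e']
            (rep [' ','t','r','u','e'] [' ','T','r','u','e'] t) := by
      rw [rep, if_neg (by simp [m2])]
    have m3 : ¬ (([' ','n','u','l','l'] : List Char).isPrefixOf
        (c :: rep [' ','f','a','l','s','e'] [' ','F','a','l','s','e']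
          (rep [' ','t','r','u','e'] [' ','T','r','u','e'] t)) = true) := by
      rw [List.isPrefixOf_iff_prefix, List.cons_prefix_cons]
      rintro ⟨hc, hpf⟩
      have hp2 := (rep_prefix_iff ['f','a','l','s','e'] ['F','a','l','s','e'] ['n','u','l','l']
        (by decide) _).mp hpf
      have hp1 := (rep_prefix_iff ['t','r','u','e'] ['T','r','u','e'] ['n','u','l','l']
        (by decide) t).mp hp2
      exact n3 (by rw [List.isPrefixOf_iff_prefix, List.cons_prefix_cons]; exact ⟨hc, hp1⟩)
    have e3 : rep [' ','n','u','l','l'] [' ','N','o','n','e']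
        (c :: rep [' ','f','a','l','s','e'] [' ','F','a','l','s','e']
          (rep [' ','t','r','u','e'] [' ','T','r','u','e'] t))
        = c :: rep [' ','n','u','l','l'] [' ','N','o','n','e']
            (rep [' ','f','a','l','s','e'] [' ','F','a','l','s','e']
              (rep [' ','t','r','u','e'] [' ','T','r','u','e'] t)) := by
      rw [rep, if_neg (by simp [m3])]
    have m4 : ¬ ((['|','\n'] : List Char).isPrefixOf
        (c :: rep [' ','n','u','l','l'] [' ','N','o','n','e']
          (rep [' ','f','a','l','s','e'] [' ','F','a','l','s','e']
            (rep [' ','t','r','u','e'] [' ','T','r','u','e'] t))) = true) := by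
      rw [List.isPrefixOf_iff_prefix, List.cons_prefix_cons]
      rintro ⟨hc, hpf⟩
      have hp3 := (rep_prefix_iff ['n','u','l','l'] ['N','o','n','e'] ['\n']
        (by decide) _).mp hpf
      have hp2 := (rep_prefix_iff ['f','a','l','s','e'] ['F','a','l','s','e'] ['\n']
        (by decide) _).mp hp3
      have hp1 := (rep_prefix_iff ['t','r','u','e'] ['T','r','u','e'] ['\n']
        (by decide) t).mp hp2
      exact n4 (by rw [List.isPrefixOf_iff_prefix, List.cons_prefix_cons]; exact ⟨hc, hp1⟩)
    have e4 : rep ['|','\n'] ['\n']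
        (c :: rep [' ','n','u','l','l'] [' ','N','o','n','e']
          (rep [' ','f','a','l','s','e'] [' ','F','a','l','s','e']
            (rep [' ','t','r','u','e'] [' ','T','r','u','e'] t)))
        = c :: rep ['|','\n'] ['\n']
            (rep [' ','n','u','l','l'] [' ','N','o','n','e']
              (rep [' ','f','a','l','s','e'] [' ','F','a','l','s','e']
                (rep [' ','t','r','u','e'] [' ','T','r','u','e'] t))) := by
      rw [rep, if_neg (by simp [m4])]
    simp only [show (" true".toList : List Char) = [' ','t','r','u','e'] from by decide,
      show (" True".toList : List Char) = [' ','T','r','u','e'] from by decide,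
      show (" false".toList : List Char) = [' ','f','a','l','s','e'] from by decide,
      show (" False".toList : List Char) = [' ','F','a','l','s','e'] from by decide,
      show (" null".toList : List Char) = [' ','n','u','l','l'] from by decide,
      show (" None".toList : List Char) = [' ','N','o','n','e'] from by decide,
      show ("|\n".toList : List Char) = ['|','\n'] from by decide,
      show ("\n".toList : List Char) = ['\n'] from by decide]
    rw [e1, e2, e3, e4]

-- ===== VERDICT (by name: the statement is the Claim_ definition above) =====
theorem convert_to_python_syntax_spec : Claim_equal_convert_to_python_syntax := by
  intro s _
  unfold Spec_convert_to_python_syntax convert_to_python_syntax convert_to_python_syntax_alt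
  simp only [List.foldl]
  rw [PySem.Str.replace, PySem.Str.replace, PySem.Str.replace, PySem.Str.replace]
  simp only [String.toList_ofList]
  rw [replace_eq_rep _ _ _ (by decide), replace_eq_rep _ _ _ (by decide),
    replace_eq_rep _ _ _ (by decide), replace_eq_rep _ _ _ (by decide)]
  exact congrArg String.ofList (main_lemma s.toList)
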